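-- pv_equiv track=rewrite | github.com/posl/comment_recommendation | script/mod_gen/4_time/en/216_C/5.py | solve
-- ===== SOURCE A (Python) =====
-- def solve(n):
--     s = ''
--     while n > 0:
--         if n % 2 == 0:
--             n //= 2
--             s = 'B' + s
--         else:
--             n -= 1
--             s = 'A' + s
--     return s
-- ===== SOURCE B (Python) =====
-- def solve(n):
--     if n <= 0:
--         return ''
--     out = ['A']
--     for b in bin(n)[3:]:
--         out.append('B')
--         if b == '1':
--             out.append('A')
--     return ''.join(out)
-- ===== Notes on version B (the rewrite author's own statement) =====
-- stated objective: alternative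
-- what changed: Replaces the div/mod reduction loop that prepends characters from the least significant end with a single forward pass over n's binary representation (bin(n)), emitting 'A' for the leading bit and then, per remaining bit, 'B' plus an extra 'A' when that bit is set, built with a list and ''.join.
import Mathlib
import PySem

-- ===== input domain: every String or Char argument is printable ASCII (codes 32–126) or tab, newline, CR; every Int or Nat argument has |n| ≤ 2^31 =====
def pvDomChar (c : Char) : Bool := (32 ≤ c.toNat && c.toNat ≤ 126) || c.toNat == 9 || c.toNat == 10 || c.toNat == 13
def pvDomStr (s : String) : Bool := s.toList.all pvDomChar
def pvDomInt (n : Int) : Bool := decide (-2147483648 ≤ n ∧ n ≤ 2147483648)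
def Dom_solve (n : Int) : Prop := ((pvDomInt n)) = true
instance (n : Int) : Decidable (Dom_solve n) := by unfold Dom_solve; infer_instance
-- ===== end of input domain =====

-- B replaces A's LSB-first div/mod loop with one forward pass over n's binary digits (alternative decomposition, same cost).

-- ===== PORT A =====
-- the while loop; the string s is carried as its character list, 'X' + s = prepend
def solveLoop (n : Int) (s : List Char) : List Char :=
  if 0 < n then
    if PySem.Int.mod n 2 = 0 then
      solveLoop (PySem.Int.floordiv n 2) ('B' :: s)
    else
      solveLoop (n - 1) ('A' :: s)
  else s
termination_by n.toNat
decreasing_by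
  · rw [PySem.Int.floordiv_eq_ediv_of_pos (by omega)]; omega
  · omega

def solve (n : Int) : String := String.mk (solveLoop n [])

-- ===== PORT B =====
-- hand port of bin(m)[2:] for m > 0 (MSB-first binary digits; exact there, the only use below)
def natBits (m : Nat) : List Char :=
  if m = 0 then []
  else natBits (m / 2) ++ [if m % 2 = 1 then '1' else '0']
termination_by m
decreasing_by omega

def solve_alt (n : Int) : String :=
  if n ≤ 0 then "" else
    String.mk
      (((natBits n.toNat).drop 1).foldl
        (fun out b => (out ++ ['B']) ++ (if b = '1' then ['A'] else [])) ['A'])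

-- ===== PRECONDITION & SPEC =====
def Spec_solve (n : Int) (out : String) : Prop := out = solve_alt n
instance (n : Int) (out : String) : Decidable (Spec_solve n out) := by unfold Spec_solve; infer_instance

-- ===== CLAIM (what is proved, stated in full; the proofs are below) =====
def Claim_equal_solve : Prop := ∀ (n : Int), Dom_solve n → Spec_solve n (solve n)

-- ===== LEMMAS AND PROOFS =====

-- common specification: A's reduction sequence, as a recursion on Nat
def enc (m : Nat) : List Char :=
  if m = 0 then []
  else if m % 2 = 0 then enc (m / 2) ++ ['B'] else enc (m - 1) ++ ['A']
termination_by m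
decreasing_by all_goals omega

-- A side: the loop computes enc, appended to the accumulator
theorem solveLoop_eq_enc (m : Nat) : ∀ s : List Char, solveLoop (m : Int) s = enc m ++ s := by
  induction m using Nat.strong_induction_on with
  | _ m ih =>
    intro s
    rw [solveLoop]
    by_cases h0 : m = 0
    · subst h0; simp [enc]
    · have hpos : 0 < (m : Int) := by omega
      rw [if_pos hpos]
      have hmod : PySem.Int.mod (m : Int) 2 = ((m % 2 : Nat) : Int) := by
        exact_mod_cast PySem.Int.mod_natCast m 2
      have hdiv : PySem.Int.floordiv (m : Int) 2 = ((m / 2 : Nat) : Int) := by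
        exact_mod_cast PySem.Int.floordiv_natCast m 2
      by_cases he : m % 2 = 0
      · rw [if_pos (by rw [hmod, he]; rfl), hdiv, ih (m / 2) (by omega)]
        conv_rhs => rw [enc, if_neg h0, if_pos he]
        simp
      · rw [if_neg (by rw [hmod]; omega), show (m : Int) - 1 = ((m - 1 : Nat) : Int) by omega,
            ih (m - 1) (by omega)]
        conv_rhs => rw [enc, if_neg h0, if_neg he]
        simp

def bitsOut (l : List Char) : List Char :=
  l.flatMap (fun b => 'B' :: (if b = '1' then ['A'] else []))

theorem foldl_bitsOut (l : List Char) : ∀ acc : List Char,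
    l.foldl (fun out b => (out ++ ['B']) ++ (if b = '1' then ['A'] else [])) acc
      = acc ++ bitsOut l := by
  induction l with
  | nil => intro acc; simp [bitsOut]
  | cons b t ih =>
    intro acc
    simp [bitsOut, List.foldl, List.flatMap, List.append_assoc]

theorem natBits_ne_nil (m : Nat) (h : 0 < m) : natBits m ≠ [] := by
  rw [natBits, if_neg (by omega)]; simp

-- B side: the forward pass over the binary digits computes enc as well
theorem bits_eq_enc (m : Nat) : 0 < m → 'A' :: bitsOut ((natBits m).drop 1) = enc m := by
  induction m using Nat.strong_induction_on with
  | _ m ih =>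
    intro hm
    rw [natBits, if_neg (by omega)]
    by_cases h1 : m / 2 = 0
    · have : m = 1 := by omega
      subst this
      simp [natBits, bitsOut, enc]
    · have hne := natBits_ne_nil (m / 2) (by omega)
      rw [List.drop_append_of_le_length (by cases hnb : natBits (m / 2) <;> simp_all)]
      rw [bitsOut, List.flatMap_append, ← bitsOut, ← bitsOut, ← List.cons_append,
          ih (m / 2) (by omega) (by omega)]
      by_cases he : m % 2 = 0
      · rw [if_neg (by omega)]
        conv_rhs => rw [enc, if_neg (by omega), if_pos he]
        simp [bitsOut]
      · rw [if_pos (by omega)]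
        conv_rhs => rw [enc, if_neg (by omega), if_neg he]
        have h2 : enc (m - 1) = enc (m / 2) ++ ['B'] := by
          conv_lhs => rw [enc, if_neg (by omega), if_pos (by omega)]
          have : (m - 1) / 2 = m / 2 := by omega
          rw [this]
        rw [h2]
        simp [bitsOut]

-- ===== VERDICT (by name: the statement is the Claim_ definition above) =====
theorem solve_spec : Claim_equal_solve := by
  intro n _
  unfold Spec_solve solve solve_alt
  by_cases h : n ≤ 0
  · rw [if_pos h, solveLoop, if_neg (by omega)]
    rfl
  · rw [if_neg h]
    have hn : n = ((n.toNat : Nat) : Int) := by omega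
    rw [hn, solveLoop_eq_enc, foldl_bitsOut, List.append_nil,
        ← bits_eq_enc n.toNat (by omega)]
    rfl
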